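-- pv_equiv track=rewrite | github.com/ShivamTripathi028/rak-chatbot-backend | utils.py | split_large_markdown_tables
-- ===== SOURCE A (Python) =====
-- def split_large_markdown_tables(content: str, max_rows=10) -> str:
--     """
--     Splits tables > 10 rows. Repeats headers.
--     Keeps chunks small enough for BGE-Base (1500 chars).
--     """
--     lines = content.split('\n')
--     new_lines = []
--
--     table_buffer = []
--     inside_table = False
--
--     for line in lines:
--         if line.strip().startswith('|'):
--             inside_table = True
--             table_buffer.append(line)
--         else:
--             if inside_table:
--                 if len(table_buffer) > (max_rows + 2):
--                     header = table_buffer[0]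
--                     separator = table_buffer[1]
--                     data_rows = table_buffer[2:]
--                     for i in range(0, len(data_rows), max_rows):
--                         chunk = data_rows[i : i + max_rows]
--                         new_lines.append(header)
--                         new_lines.append(separator)
--                         new_lines.extend(chunk)
--                         new_lines.append("\n")
--                 else:
--                     new_lines.extend(table_buffer)
--                 inside_table = False
--                 table_buffer = []
--
--             new_lines.append(line)
--
--     if inside_table and table_buffer:
--         new_lines.extend(table_buffer)
--
--     return "\n".join(new_lines)
-- ===== SOURCE B (Python) =====
-- def split_large_markdown_tables(content: str, max_rows=10) -> str:
--     """Partition the lines into maximal runs of table / non-table lines, then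
--     render each run: oversized table runs are split into chunks of max_rows
--     data rows, each chunk preceded by the repeated header and separator and
--     followed by a blank spacer line; everything else is emitted verbatim."""
--     lines = content.split('\n')
--     n = len(lines)
--     blocks = []
--     i = 0
--     while i < n:
--         t = lines[i].strip().startswith('|')
--         j = i + 1
--         while j < n and lines[j].strip().startswith('|') == t:
--             j += 1
--         blocks.append((t, lines[i:j]))
--         i = j
--     out = []
--     for t, block in blocks:
--         if t and len(block) > max_rows + 2:
--             header, separator, data = block[0], block[1], block[2:]
--             for k in range(0, len(data), max_rows):
--                 out += [header, separator] + data[k:k + max_rows] + ["\n"]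
--         else:
--             out += block
--     return "\n".join(out)
-- ===== Notes on version B (the rewrite author's own statement) =====
-- stated objective: alternative
-- what changed: Replaces A's streaming flag-and-buffer loop by a two-phase decomposition (partition the lines into maximal table/non-table runs, then render every run uniformly, chunking oversized table runs); Pre_ restricts to positive max_rows when table lines are present, the function's natural domain, since for max_rows <= 0 chunking is meaningless and A variously raises (ValueError from range step 0, IndexError on a one-line run) or silently deletes table rows.
-- intended difference: On inputs with positive max_rows whose final line-run is a table with more than max_rows+2 lines, A returns it verbatim (its flush only runs when a non-table line follows, so a document ending in a large table is never split, defeating the function's stated purpose), while B splits it into header-repeated chunks like any other oversized table, which is the intended value. — e.g. on split_large_markdown_tables("|h\n|-\n|1\n|2", 1): A returns "|h\n|-\n|1\n|2", B returns "|h\n|-\n|1\n\n\n|h\n|-\n|2\n\n"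
-- outside the precondition, e.g. on split_large_markdown_tables('| a |\n| b |\n| c |\ntext', -1): A returns 'text', B returns 'text'; on split_large_markdown_tables('| a |\n| b |\n| c |', -1): A returns '| a |\n| b |\n| c |', B returns ''
import Mathlib
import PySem

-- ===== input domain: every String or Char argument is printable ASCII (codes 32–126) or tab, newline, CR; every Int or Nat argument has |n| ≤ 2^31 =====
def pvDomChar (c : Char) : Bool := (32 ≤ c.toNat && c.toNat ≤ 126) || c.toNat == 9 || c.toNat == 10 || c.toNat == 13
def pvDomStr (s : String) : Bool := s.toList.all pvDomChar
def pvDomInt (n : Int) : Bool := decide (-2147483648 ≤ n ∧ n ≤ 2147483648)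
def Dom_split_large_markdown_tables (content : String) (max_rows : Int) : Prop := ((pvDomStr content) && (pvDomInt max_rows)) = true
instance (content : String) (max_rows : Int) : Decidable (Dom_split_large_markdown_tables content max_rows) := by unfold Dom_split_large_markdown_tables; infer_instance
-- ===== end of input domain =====

-- B partitions the lines into maximal table/non-table runs and renders every run uniformly
-- (chunking oversized table runs), instead of A's flag-and-buffer streaming loop; unlike A,
-- B also chunks an oversized table that ends the document (stated as D_ below).


-- ===== PORT A =====
-- A-side helper: the body of A's `for line in lines` loop, on state (new_lines, table_buffer, inside_table);
-- table_buffer[0]/[1] are read with getD "" — inside Pre_ the chunking branch only runs with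
-- length > max_rows + 2 ≥ 3, so both indices are in range exactly as in the Python
def pvStepA (max_rows : Int) (st : List String × List String × Bool) (line : String) :
    List String × List String × Bool :=
  let new_lines := st.1
  let table_buffer := st.2.1
  let inside_table := st.2.2
  if PySem.Str.startswith (PySem.Str.strip line) "|" then
    (new_lines, table_buffer ++ [line], true)
  else
    let new_lines :=
      if inside_table then
        if (table_buffer.length : Int) > max_rows + 2 then
          let header := table_buffer.getD 0 ""
          let separator := table_buffer.getD 1 ""
          let data_rows := PySem.List.slice table_buffer (some 2) none
          (PySem.List.pyRange 0 (data_rows.length : Int) max_rows).foldl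
            (fun acc i =>
              let chunk := PySem.List.slice data_rows (some i) (some (i + max_rows))
              acc ++ [header] ++ [separator] ++ chunk ++ ["\n"])
            new_lines
        else new_lines ++ table_buffer
      else new_lines
    (new_lines ++ [line], [], false)

def split_large_markdown_tables (content : String) (max_rows : Int) : String :=
  let lines := (PySem.Str.split? content "\n").getD []   -- sep "\n" ≠ "", never none
  let res := lines.foldl (pvStepA max_rows) ([], [], false)
  let new_lines := if res.2.2 && !res.2.1.isEmpty then res.1 ++ res.2.1 else res.1
  PySem.Str.join "\n" new_lines

-- ===== PORT B =====
-- B-side helper: partition the lines into maximal runs of equal is-table status (Source B's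
-- index-scanning while loops become takeWhile/dropWhile of the same predicate)
def pvBlocksOfFuel : Nat → List String → List (Bool × List String)
  | _, [] => []
  | 0, _ :: _ => []
  | f + 1, l :: ls =>
    let t := PySem.Str.startswith (PySem.Str.strip l) "|"
    (t, l :: ls.takeWhile (fun x => PySem.Str.startswith (PySem.Str.strip x) "|" == t))
      :: pvBlocksOfFuel f (ls.dropWhile (fun x => PySem.Str.startswith (PySem.Str.strip x) "|" == t))

-- each step consumes at least one line, so ls.length fuel always suffices
def pvBlocksOf (ls : List String) : List (Bool × List String) := pvBlocksOfFuel ls.length ls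

-- B-side helper: the body of Source B's `for t, block in blocks` loop
def pvStepB (max_rows : Int) (out : List String) (tb : Bool × List String) : List String :=
  if tb.1 && (tb.2.length : Int) > max_rows + 2 then
    let header := tb.2.getD 0 ""
    let separator := tb.2.getD 1 ""
    let data := PySem.List.slice tb.2 (some 2) none
    (PySem.List.pyRange 0 (data.length : Int) max_rows).foldl
      (fun acc k => acc ++ ([header, separator] ++ PySem.List.slice data (some k) (some (k + max_rows)) ++ ["\n"]))
      out
  else out ++ tb.2

def split_large_markdown_tables_alt (content : String) (max_rows : Int) : String :=
  let blocks := pvBlocksOf ((PySem.Str.split? content "\n").getD [])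
  PySem.Str.join "\n" (blocks.foldl (pvStepB max_rows) [])

-- ===== PRECONDITION & SPEC =====
-- Pre_ restricts to the function's natural domain: positive max_rows, or content with no table
-- lines at all (where max_rows is never used).  For max_rows ≤ 0 in the presence of table lines
-- the chunking step is meaningless and A variously raises (ValueError from range step 0 when
-- max_rows = 0, IndexError reading the separator of a one-line run) or silently deletes table rows.
def Pre_split_large_markdown_tables (content : String) (max_rows : Int) : Prop :=
  1 ≤ max_rows ∨
    ((PySem.Str.split? content "\n").getD []).all
      (fun l => !(PySem.Str.startswith (PySem.Str.strip l) "|")) = true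
instance (content : String) (max_rows : Int) : Decidable (Pre_split_large_markdown_tables content max_rows) := by unfold Pre_split_large_markdown_tables; infer_instance
def pvWitness_split_large_markdown_tables : String × Int := ("| a | b |\n|---|---|\n| 1 | 2 |\n| 3 | 4 |\ntext", 1)

-- D_-side helpers (char-level, independent of the ports): one pass over the characters,
-- maintaining (run of consecutive table lines completed so far at the current position,
-- status of the current line: 0 = only whitespace so far, 1 = table line, 2 = other)
def pvLineStep (st : Nat × Nat) (c : Char) : Nat × Nat :=
  if c = '\n' then (if st.2 == 1 then st.1 + 1 else 0, 0)
  else if st.2 == 0 then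
    if PySem.Chars.isspace c then st
    else if c = '|' then (st.1, 1) else (st.1, 2)
  else st

-- length of the final run of table lines (lines whose first non-whitespace char is '|')
def pvTrailRun (cs : List Char) : Nat :=
  let st := cs.foldl pvLineStep (0, 0)
  if st.2 == 1 then st.1 + 1 else 0

def pvTrailOf (content : String) : Int := pvTrailRun content.toList

-- On inputs (with positive max_rows) whose final line-run is a table with more than
-- max_rows + 2 lines, A returns it
-- verbatim (its flush only runs when a non-table line follows, so a document ending in a large
-- table is never split, defeating the function's purpose), while B splits it into
-- header-repeated chunks like any other oversized table, which is the intended value.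
def D_split_large_markdown_tables (content : String) (max_rows : Int) : Prop :=
  max_rows + 2 < pvTrailOf content ∧ 1 ≤ max_rows
instance (content : String) (max_rows : Int) : Decidable (D_split_large_markdown_tables content max_rows) := by unfold D_split_large_markdown_tables; infer_instance

def Spec_split_large_markdown_tables (content : String) (max_rows : Int) (out : String) : Prop := ¬ D_split_large_markdown_tables content max_rows → out = split_large_markdown_tables_alt content max_rows
instance (content : String) (max_rows : Int) (out : String) : Decidable (Spec_split_large_markdown_tables content max_rows out) := by unfold Spec_split_large_markdown_tables; infer_instance

def pvDiffWitness_split_large_markdown_tables : String × Int := ("|h\n|-\n|1\n|2", 1)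
def pvDiffWitnessOut_split_large_markdown_tables : String × String :=
  ("|h\n|-\n|1\n|2", "|h\n|-\n|1\n\n\n|h\n|-\n|2\n\n")

-- ===== CLAIM (what is proved, stated in full; the proofs are below) =====
def Claim_unchanged_split_large_markdown_tables : Prop := ∀ (content : String) (max_rows : Int), Dom_split_large_markdown_tables content max_rows → Pre_split_large_markdown_tables content max_rows → Spec_split_large_markdown_tables content max_rows (split_large_markdown_tables content max_rows)
def Claim_changed_split_large_markdown_tables : Prop := Dom_split_large_markdown_tables (pvDiffWitness_split_large_markdown_tables.1) (pvDiffWitness_split_large_markdown_tables.2) ∧ Pre_split_large_markdown_tables (pvDiffWitness_split_large_markdown_tables.1) (pvDiffWitness_split_large_markdown_tables.2) ∧ D_split_large_markdown_tables (pvDiffWitness_split_large_markdown_tables.1) (pvDiffWitness_split_large_markdown_tables.2) ∧ split_large_markdown_tables (pvDiffWitness_split_large_markdown_tables.1) (pvDiffWitness_split_large_markdown_tables.2) = pvDiffWitnessOut_split_large_markdown_tables.1 ∧ split_large_markdown_tables_alt (pvDiffWitness_split_large_markdown_tables.1) (pvDiffWitness_split_large_markdown_tables.2) = pvDiffWitnessOut_split_large_markdown_tables.2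 ∧ pvDiffWitnessOut_split_large_markdown_tables.1 ≠ pvDiffWitnessOut_split_large_markdown_tables.2
def Claim_exact_split_large_markdown_tables : Prop := ∀ (content : String) (max_rows : Int), Dom_split_large_markdown_tables content max_rows → Pre_split_large_markdown_tables content max_rows → D_split_large_markdown_tables content max_rows → split_large_markdown_tables content max_rows ≠ split_large_markdown_tables_alt content max_rows

-- ===== LEMMAS AND PROOFS =====

-- ---- fuel irrelevance for the block partition ----

theorem pvBlocksOfFuel_irrel (f : Nat) : ∀ (g : Nat) (ls : List String),
    ls.length ≤ f → ls.length ≤ g → pvBlocksOfFuel f ls = pvBlocksOfFuel g ls := by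
  induction f with
  | zero =>
    intro g ls hf _
    cases ls with
    | nil => cases g <;> rfl
    | cons l ls => simp at hf
  | succ f ih =>
    intro g ls hf hg
    cases ls with
    | nil => cases g <;> rfl
    | cons l ls =>
      cases g with
      | zero => simp at hg
      | succ g =>
        simp only [pvBlocksOfFuel]
        congr 1
        exact ih g _
          (le_trans (List.length_dropWhile_le ..) (by simpa using Nat.le_of_succ_le_succ hf))
          (le_trans (List.length_dropWhile_le ..) (by simpa using Nat.le_of_succ_le_succ hg))

theorem pvBlocksOf_cons (l : String) (ls : List String) :
    pvBlocksOf (l :: ls) =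
      (PySem.Str.startswith (PySem.Str.strip l) "|",
        l :: ls.takeWhile (fun x => PySem.Str.startswith (PySem.Str.strip x) "|" == PySem.Str.startswith (PySem.Str.strip l) "|"))
      :: pvBlocksOf (ls.dropWhile (fun x => PySem.Str.startswith (PySem.Str.strip x) "|" == PySem.Str.startswith (PySem.Str.strip l) "|")) := by
  simp only [pvBlocksOf, List.length_cons, pvBlocksOfFuel]
  congr 1
  exact pvBlocksOfFuel_irrel ls.length _ _ (List.length_dropWhile_le ..) le_rfl

-- the line predicate both programs use
def pvTab (l : String) : Bool := PySem.Str.startswith (PySem.Str.strip l) "|"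

-- the rendering of one oversized table buffer (header, separator, chunk, "\n" per chunk)
def pvChunk (m : Int) (buf : List String) : List String :=
  (PySem.List.pyRange 0 (((PySem.List.slice buf (some 2) none).length : Int)) m).flatMap
    (fun i => [buf.getD 0 "", buf.getD 1 ""]
      ++ PySem.List.slice (PySem.List.slice buf (some 2) none) (some i) (some (i + m)) ++ ["\n"])

-- what A emits when it flushes a (possibly empty) buffer at a non-table line
def pvFlush (m : Int) (buf : List String) : List String :=
  if buf.isEmpty then []
  else if (buf.length : Int) > m + 2 then pvChunk m buf else buf

-- forward recursion equivalent to A's streaming loop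
def pvGo (m : Int) (buf : List String) : List String → List String
  | [] => buf
  | l :: ls => if pvTab l then pvGo m (buf ++ [l]) ls
               else pvFlush m buf ++ [l] ++ pvGo m [] ls

-- body of one block in B
def pvBody (m : Int) (tb : Bool × List String) : List String :=
  if tb.1 && ((tb.2.length : Int) > m + 2) then pvChunk m tb.2 else tb.2

-- what A's loop produces: every block but the last through pvBody, the last verbatim
def pvRender (m : Int) (bs : List (Bool × List String)) : List String :=
  bs.dropLast.flatMap (pvBody m) ++ (bs.drop (bs.length - 1)).flatMap (·.2)

-- ---- step-function evaluation lemmas ----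

theorem pvStepA_tab (m : Int) (st : List String × List String × Bool) (l : String)
    (hp : pvTab l = true) : pvStepA m st l = (st.1, st.2.1 ++ [l], true) := by
  have hpc : PySem.Chars.startswith (PySem.Chars.strip l.toList) ['|'] = true := by
    simp only [pvTab] at hp; simpa using hp
  simp only [pvStepA]
  rw [if_pos (by simp [hpc])]

theorem pvStepA_text_out (m : Int) (acc : List String) (l : String)
    (hp : pvTab l = false) : pvStepA m (acc, [], false) l = (acc ++ [l], [], false) := by
  have hpc : PySem.Chars.startswith (PySem.Chars.strip l.toList) ['|'] = false := by
    simp only [pvTab] at hp; simpa using hp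
  simp only [pvStepA]
  rw [if_neg (by simp [hpc])]
  simp

theorem pvStepA_text_small (m : Int) (acc buf : List String) (l : String)
    (hp : pvTab l = false) (hlen : ¬ ((buf.length : Int) > m + 2)) :
    pvStepA m (acc, buf, true) l = (acc ++ buf ++ [l], [], false) := by
  have hpc : PySem.Chars.startswith (PySem.Chars.strip l.toList) ['|'] = false := by
    simp only [pvTab] at hp; simpa using hp
  simp only [pvStepA]
  rw [if_neg (by simp [hpc])]
  simp [hlen]

theorem pvStepA_text_big (m : Int) (acc buf : List String) (l : String)
    (hp : pvTab l = false) (hlen : (buf.length : Int) > m + 2) :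
    pvStepA m (acc, buf, true) l = (acc ++ pvChunk m buf ++ [l], [], false) := by
  have hpc : PySem.Chars.startswith (PySem.Chars.strip l.toList) ['|'] = false := by
    simp only [pvTab] at hp; simpa using hp
  simp only [pvStepA]
  rw [if_neg (by simp [hpc])]
  simp only [if_pos hlen]
  have hf : (fun (a : List String) (i : Int) =>
        a ++ [buf.getD 0 ""] ++ [buf.getD 1 ""]
          ++ PySem.List.slice (PySem.List.slice buf (some 2) none) (some i) (some (i + m)) ++ ["\n"])
      = fun a i => a ++ ([buf.getD 0 "", buf.getD 1 ""]
          ++ PySem.List.slice (PySem.List.slice buf (some 2) none) (some i) (some (i + m)) ++ ["\n"]) := by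
    funext a i; simp
  rw [hf, PySem.List.foldl_append_eq_flatMap]
  rfl

theorem pvStepB_body (m : Int) (out : List String) (tb : Bool × List String) :
    pvStepB m out tb = out ++ pvBody m tb := by
  by_cases hc : (tb.1 && ((tb.2.length : Int) > m + 2)) = true
  · simp only [pvStepB, pvBody, hc]
    rw [PySem.List.foldl_append_eq_flatMap]
    rfl
  · simp only [pvStepB, pvBody, hc, Bool.false_eq_true, if_false]

-- ---- A's loop equals pvGo ----

theorem pvA_go (m : Int) (ls : List String) (acc buf : List String) (ins : Bool)
    (h : ins = !buf.isEmpty) :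
    (if (ls.foldl (pvStepA m) (acc, buf, ins)).2.2 && !(ls.foldl (pvStepA m) (acc, buf, ins)).2.1.isEmpty
     then (ls.foldl (pvStepA m) (acc, buf, ins)).1 ++ (ls.foldl (pvStepA m) (acc, buf, ins)).2.1
     else (ls.foldl (pvStepA m) (acc, buf, ins)).1)
    = acc ++ pvGo m buf ls := by
  induction ls generalizing acc buf ins with
  | nil =>
    subst h
    cases buf with
    | nil => simp [pvGo]
    | cons b bs => simp [pvGo]
  | cons l ls ih =>
    by_cases hp : pvTab l = true
    · simp only [List.foldl_cons, pvStepA_tab m _ l hp]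
      rw [ih acc (buf ++ [l]) true (by simp)]
      simp [pvGo, hp]
    · have hp' : pvTab l = false := by simpa using hp
      subst h
      cases buf with
      | nil =>
        simp only [List.foldl_cons, List.isEmpty_nil, Bool.not_true,
          pvStepA_text_out m acc l hp']
        rw [ih (acc ++ [l]) [] false (by simp)]
        simp only [pvGo, hp', Bool.false_eq_true, if_false, pvFlush, List.isEmpty_nil]
        simp
      | cons b bs =>
        by_cases hlen : ((b :: bs).length : Int) > m + 2
        · simp only [List.foldl_cons, List.isEmpty_cons, Bool.not_false,
            pvStepA_text_big m acc (b :: bs) l hp' hlen]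
          rw [ih (acc ++ pvChunk m (b :: bs) ++ [l]) [] false (by simp)]
          simp only [pvGo, hp', Bool.false_eq_true, if_false, pvFlush, List.isEmpty_cons,
            if_pos hlen]
          simp
        · simp only [List.foldl_cons, List.isEmpty_cons, Bool.not_false,
            pvStepA_text_small m acc (b :: bs) l hp' hlen]
          rw [ih (acc ++ (b :: bs) ++ [l]) [] false (by simp)]
          simp only [pvGo, hp', Bool.false_eq_true, if_false, pvFlush, List.isEmpty_cons,
            if_neg hlen]
          simp

-- ---- pvGo equals pvRender of the blocks ----

theorem pvGo_table_run (m : Int) (run rest buf : List String)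
    (h : ∀ x ∈ run, pvTab x = true) :
    pvGo m buf (run ++ rest) = pvGo m (buf ++ run) rest := by
  induction run generalizing buf with
  | nil => simp
  | cons r rs ih =>
    have hr : pvTab r = true := h r (by simp)
    simp only [List.cons_append, pvGo, hr]
    rw [ih (buf ++ [r]) (fun x hx => h x (by simp [hx]))]
    simp

theorem pvGo_text_run (m : Int) (run rest : List String)
    (h : ∀ x ∈ run, pvTab x = false) :
    pvGo m [] (run ++ rest) = run ++ pvGo m [] rest := by
  induction run with
  | nil => simp
  | cons r rs ih =>
    have hr : pvTab r = false := h r (by simp)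
    simp only [List.cons_append, pvGo, hr, Bool.false_eq_true, if_false, pvFlush,
      List.isEmpty_nil]
    rw [ih (fun x hx => h x (by simp [hx]))]
    simp

theorem pvDropWhile_head_false {α : Type} (p : α → Bool) (l : List α) (r : α) (rs : List α)
    (h : l.dropWhile p = r :: rs) : p r = false := by
  induction l with
  | nil => simp at h
  | cons a as ih =>
    by_cases hp : p a
    · rw [List.dropWhile_cons_of_pos hp] at h; exact ih h
    · rw [List.dropWhile_cons_of_neg hp] at h
      cases h; simpa using hp

theorem pvBlocksOf_ne_nil (l : String) (ls : List String) : pvBlocksOf (l :: ls) ≠ [] := by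
  rw [pvBlocksOf_cons]; simp

-- a whole homogeneous final block is emitted verbatim by A
theorem pvGo_block_last (m : Int) (t : Bool) (l : String) (run : List String)
    (hl : pvTab l = t) (hr : ∀ x ∈ run, pvTab x = t) :
    pvGo m [] (l :: run) = l :: run := by
  cases t with
  | true =>
    have h1 := pvGo_table_run m (l :: run) [] []
      (by intro x hx
          rcases List.mem_cons.mp hx with hx | hx
          · subst hx; exact hl
          · exact hr x hx)
    simpa [pvGo] using h1
  | false =>
    have h1 := pvGo_text_run m (l :: run) []
      (by intro x hx
          rcases List.mem_cons.mp hx with hx | hx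
          · subst hx; exact hl
          · exact hr x hx)
    simpa [pvGo] using h1

-- a homogeneous block followed by an opposite-status line renders as pvBody
theorem pvGo_block_mid (m : Int) (t : Bool) (l : String) (run : List String)
    (r : String) (rs : List String)
    (hl : pvTab l = t) (hrun : ∀ x ∈ run, pvTab x = t) (hr : pvTab r = !t) :
    pvGo m [] (l :: run ++ r :: rs) = pvBody m (t, l :: run) ++ pvGo m [] (r :: rs) := by
  cases t with
  | true =>
    have hall : ∀ x ∈ l :: run, pvTab x = true := by
      intro x hx
      rcases List.mem_cons.mp hx with hx | hx
      · subst hx; exact hl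
      · exact hrun x hx
    have h1 := pvGo_table_run m (l :: run) (r :: rs) [] hall
    simp only [List.nil_append] at h1
    have hrf : pvTab r = false := by simpa using hr
    rw [show (l :: run ++ r :: rs) = ((l :: run) ++ r :: rs) by simp] at *
    rw [h1]
    rw [show pvGo m (l :: run) (r :: rs)
        = pvFlush m (l :: run) ++ [r] ++ pvGo m [] rs from by
      simp [pvGo, hrf]]
    rw [show pvGo m [] (r :: rs) = [r] ++ pvGo m [] rs from by
      simp [pvGo, hrf, pvFlush]]
    simp only [pvFlush, pvBody, List.isEmpty_cons, Bool.true_and]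
    by_cases hlen : (((l :: run).length : Int) > m + 2)
    · simp [hlen, List.append_assoc]
    · simp [hlen]
  | false =>
    have hall : ∀ x ∈ l :: run, pvTab x = false := by
      intro x hx
      rcases List.mem_cons.mp hx with hx | hx
      · subst hx; exact hl
      · exact hrun x hx
    have h1 := pvGo_text_run m (l :: run) (r :: rs) hall
    rw [show (l :: run ++ r :: rs) = ((l :: run) ++ r :: rs) by simp] at *
    rw [h1]
    simp [pvBody]

theorem pvGo_render (m : Int) (ls : List String) :
    pvGo m [] ls = pvRender m (pvBlocksOf ls) := by
  induction hn : ls.length using Nat.strong_induction_on generalizing ls with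
  | _ n ih =>
  cases ls with
  | nil => simp [pvGo, pvBlocksOf, pvBlocksOfFuel, pvRender]
  | cons l ls' =>
    rw [pvBlocksOf_cons]
    have htab : pvTab l = PySem.Str.startswith (PySem.Str.strip l) "|" := rfl
    have hsplit := List.takeWhile_append_dropWhile
      (p := fun x => PySem.Str.startswith (PySem.Str.strip x) "|" == PySem.Str.startswith (PySem.Str.strip l) "|") (l := ls')
    have hrun : ∀ x ∈ ls'.takeWhile (fun x => PySem.Str.startswith (PySem.Str.strip x) "|" == PySem.Str.startswith (PySem.Str.strip l) "|"),
        pvTab x = PySem.Str.startswith (PySem.Str.strip l) "|" := by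
      intro x hx
      have := List.mem_takeWhile_imp hx
      simpa [pvTab] using this
    have hlen := List.length_dropWhile_le
      (p := fun x => PySem.Str.startswith (PySem.Str.strip x) "|" == PySem.Str.startswith (PySem.Str.strip l) "|") (l := ls')
    cases hrest : ls'.dropWhile (fun x => PySem.Str.startswith (PySem.Str.strip x) "|" == PySem.Str.startswith (PySem.Str.strip l) "|") with
    | nil =>
      have hls' : ls'.takeWhile (fun x => PySem.Str.startswith (PySem.Str.strip x) "|" == PySem.Str.startswith (PySem.Str.strip l) "|") = ls' := by
        conv_rhs => rw [← hsplit]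
        rw [hrest, List.append_nil]
      rw [show pvBlocksOf ([] : List String) = [] from rfl, hls']
      rw [pvGo_block_last m (PySem.Str.startswith (PySem.Str.strip l) "|") l ls' htab
        (by intro x hx; exact hrun x (by rw [hls']; exact hx))]
      simp [pvRender]
    | cons r rs =>
      have h1 := pvDropWhile_head_false
        (fun x => PySem.Str.startswith (PySem.Str.strip x) "|" == PySem.Str.startswith (PySem.Str.strip l) "|") ls' r rs hrest
      have hrt : pvTab r = !(PySem.Str.startswith (PySem.Str.strip l) "|") := by
        simp only [pvTab]
        simp only [beq_eq_false_iff_ne, ne_eq] at h1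
        cases hx : PySem.Str.startswith (PySem.Str.strip r) "|" <;>
          cases hy : PySem.Str.startswith (PySem.Str.strip l) "|" <;> simp_all
      have hih : pvGo m [] (r :: rs) = pvRender m (pvBlocksOf (r :: rs)) := by
        refine ih (r :: rs).length ?_ (r :: rs) rfl
        rw [hrest] at hlen
        simp only [List.length_cons] at hn hlen ⊢
        omega
      have hrender : pvRender m ((PySem.Str.startswith (PySem.Str.strip l) "|",
            l :: ls'.takeWhile (fun x => PySem.Str.startswith (PySem.Str.strip x) "|" == PySem.Str.startswith (PySem.Str.strip l) "|"))
            :: pvBlocksOf (r :: rs))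
          = pvBody m (PySem.Str.startswith (PySem.Str.strip l) "|",
            l :: ls'.takeWhile (fun x => PySem.Str.startswith (PySem.Str.strip x) "|" == PySem.Str.startswith (PySem.Str.strip l) "|"))
            ++ pvRender m (pvBlocksOf (r :: rs)) := by
        rcases hbs : pvBlocksOf (r :: rs) with _ | ⟨b, bs⟩
        · exact absurd hbs (pvBlocksOf_ne_nil r rs)
        · simp [pvRender, List.dropLast_cons_of_ne_nil]
      rw [hrender, ← hih]
      conv_lhs => rw [show l :: ls'
          = (l :: ls'.takeWhile (fun x => PySem.Str.startswith (PySem.Str.strip x) "|" == PySem.Str.startswith (PySem.Str.strip l) "|")) ++ (r :: rs) from by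
        rw [← hrest, List.cons_append, hsplit]]
      exact pvGo_block_mid m _ l _ r rs htab hrun hrt

-- ---- B's fold renders every block through pvBody ----

theorem pvB_flatMap (m : Int) (bs : List (Bool × List String)) :
    bs.foldl (pvStepB m) [] = bs.flatMap (pvBody m) := by
  have h1 : bs.foldl (pvStepB m) [] = bs.foldl (fun out tb => out ++ pvBody m tb) [] := by
    apply List.foldl_ext; intro a b _; exact pvStepB_body m a b
  rw [h1, PySem.List.foldl_append_eq_flatMap]
  simp

-- ---- the trailing table run of ls equals the trailing run of its dropWhile tail ----

theorem pvTrailing_shift (t : Bool) (l : String) (run rest : List String)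
    (hl : pvTab l = t) (hrun : ∀ x ∈ run, pvTab x = t)
    (hr : ∀ x rs, rest = x :: rs → pvTab x = !t) (hne : rest ≠ []) :
    ((l :: run) ++ rest).reverse.takeWhile pvTab = rest.reverse.takeWhile pvTab := by
  rcases rest with _ | ⟨r, rs⟩
  · exact absurd rfl hne
  have hrt : pvTab r = !t := hr r rs rfl
  rw [List.reverse_append, List.takeWhile_append]
  split
  · rename_i hlen
    -- the whole tail is table lines, so t = false and the run contributes nothing
    have hself : (r :: rs).reverse.takeWhile pvTab = (r :: rs).reverse :=
      (List.takeWhile_prefix _).eq_of_length hlen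
    have hall : ∀ x ∈ (r :: rs).reverse, pvTab x = true := List.takeWhile_eq_self_iff.mp hself
    have ht : t = false := by
      have := hall r (by simp)
      cases t
      · rfl
      · rw [this] at hrt; exact absurd hrt.symm (by simp)
    subst ht
    have htake2 : ((l :: run).reverse).takeWhile pvTab = [] := by
      apply List.takeWhile_eq_nil_iff.mpr
      intro hlt hp
      have hmem : (l :: run).reverse.get ⟨0, hlt⟩ ∈ l :: run :=
        List.mem_reverse.mp (List.get_mem _ _)
      rcases List.mem_cons.mp hmem with h | h
      · rw [h, hl] at hp; exact absurd hp (by simp)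
      · rw [hrun _ h] at hp; exact absurd hp (by simp)
    rw [htake2, hself, List.append_nil]
  · rfl

-- under ¬D_, A's last-block-verbatim rendering agrees with B's uniform rendering
theorem pvNoTrailBig (m : Int) (ls : List String)
    (hD : ((ls.reverse.takeWhile pvTab).length : Int) ≤ m + 2 ∨ (ls.reverse.takeWhile pvTab).length = 0) :
    pvRender m (pvBlocksOf ls) = (pvBlocksOf ls).flatMap (pvBody m) := by
  induction hn : ls.length using Nat.strong_induction_on generalizing ls with
  | _ n ih =>
  cases ls with
  | nil => simp [pvBlocksOf, pvBlocksOfFuel, pvRender]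
  | cons l ls' =>
    rw [pvBlocksOf_cons]
    have htab : pvTab l = PySem.Str.startswith (PySem.Str.strip l) "|" := rfl
    have hsplit := List.takeWhile_append_dropWhile
      (p := fun x => PySem.Str.startswith (PySem.Str.strip x) "|" == PySem.Str.startswith (PySem.Str.strip l) "|") (l := ls')
    have hrun : ∀ x ∈ ls'.takeWhile (fun x => PySem.Str.startswith (PySem.Str.strip x) "|" == PySem.Str.startswith (PySem.Str.strip l) "|"),
        pvTab x = PySem.Str.startswith (PySem.Str.strip l) "|" := by
      intro x hx
      have := List.mem_takeWhile_imp hx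
      simpa [pvTab] using this
    have hlen := List.length_dropWhile_le
      (p := fun x => PySem.Str.startswith (PySem.Str.strip x) "|" == PySem.Str.startswith (PySem.Str.strip l) "|") (l := ls')
    cases hrest : ls'.dropWhile (fun x => PySem.Str.startswith (PySem.Str.strip x) "|" == PySem.Str.startswith (PySem.Str.strip l) "|") with
    | nil =>
      have hls' : ls'.takeWhile (fun x => PySem.Str.startswith (PySem.Str.strip x) "|" == PySem.Str.startswith (PySem.Str.strip l) "|") = ls' := by
        conv_rhs => rw [← hsplit]
        rw [hrest, List.append_nil]
      rw [hls', show pvBlocksOf ([] : List String) = [] from rfl]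
      have hr1 : pvRender m [(PySem.Str.startswith (PySem.Str.strip l) "|", l :: ls')]
          = l :: ls' := by simp [pvRender]
      have hr2 : List.flatMap (pvBody m) [(PySem.Str.startswith (PySem.Str.strip l) "|", l :: ls')]
          = pvBody m (PySem.Str.startswith (PySem.Str.strip l) "|", l :: ls') := by simp
      rw [hr1, hr2]
      -- goal: last (only) block verbatim = pvBody of it
      cases ht : PySem.Str.startswith (PySem.Str.strip l) "|" with
      | false =>
        simp [pvBody, ht]
      | true =>
        have hall : ∀ x ∈ (l :: ls').reverse, pvTab x = true := by
          intro x hx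
          rcases List.mem_cons.mp (List.mem_reverse.mp hx) with h | h
          · rw [h, htab, ht]
          · rw [hrun x (by rw [hls']; exact h), ht]
        have hself : (l :: ls').reverse.takeWhile pvTab = (l :: ls').reverse :=
          List.takeWhile_eq_self_iff.mpr hall
        rw [hself] at hD
        simp only [List.length_reverse] at hD
        have hle : ¬ ((((l :: ls').length : Int)) > m + 2) := by
          rcases hD with h | h
          · omega
          · simp at h
        simp only [pvBody, ht, Bool.true_and]
        rw [if_neg (by simpa using hle)]
    | cons r rs =>
      have h1 := pvDropWhile_head_false
        (fun x => PySem.Str.startswith (PySem.Str.strip x) "|" == PySem.Str.startswith (PySem.Str.strip l) "|") ls' r rs hrest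
      have hrt : pvTab r = !(PySem.Str.startswith (PySem.Str.strip l) "|") := by
        simp only [pvTab]
        simp only [beq_eq_false_iff_ne, ne_eq] at h1
        cases hx : PySem.Str.startswith (PySem.Str.strip r) "|" <;>
          cases hy : PySem.Str.startswith (PySem.Str.strip l) "|" <;> simp_all
      have hshift : (l :: ls').reverse.takeWhile pvTab = (r :: rs).reverse.takeWhile pvTab := by
        have := pvTrailing_shift (PySem.Str.startswith (PySem.Str.strip l) "|") l
          (ls'.takeWhile (fun x => PySem.Str.startswith (PySem.Str.strip x) "|" == PySem.Str.startswith (PySem.Str.strip l) "|"))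
          (r :: rs) htab hrun (by intro x xs hx; cases hx; exact hrt) (by simp)
        rw [show (l :: ls') = (l :: ls'.takeWhile (fun x => PySem.Str.startswith (PySem.Str.strip x) "|" == PySem.Str.startswith (PySem.Str.strip l) "|")) ++ (r :: rs) from by
          rw [← hrest, List.cons_append, hsplit]]
        exact this
      have hih : pvRender m (pvBlocksOf (r :: rs)) = (pvBlocksOf (r :: rs)).flatMap (pvBody m) := by
        refine ih (r :: rs).length ?_ (r :: rs) (by rw [← hshift]; exact hD) rfl
        rw [hrest] at hlen
        simp only [List.length_cons] at hn hlen ⊢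
        omega
      have hrender : pvRender m ((PySem.Str.startswith (PySem.Str.strip l) "|",
            l :: ls'.takeWhile (fun x => PySem.Str.startswith (PySem.Str.strip x) "|" == PySem.Str.startswith (PySem.Str.strip l) "|"))
            :: pvBlocksOf (r :: rs))
          = pvBody m (PySem.Str.startswith (PySem.Str.strip l) "|",
            l :: ls'.takeWhile (fun x => PySem.Str.startswith (PySem.Str.strip x) "|" == PySem.Str.startswith (PySem.Str.strip l) "|"))
            ++ pvRender m (pvBlocksOf (r :: rs)) := by
        rcases hbs : pvBlocksOf (r :: rs) with _ | ⟨b, bs⟩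
        · exact absurd hbs (pvBlocksOf_ne_nil r rs)
        · simp [pvRender, List.dropLast_cons_of_ne_nil]
      rw [hrender, hih, List.flatMap_cons]

-- ---- the stated change region D_ in terms of the ports' primitives ----

-- proof-side reference model of D_: the split into lines …
def pvSplitLines : List Char → List (List Char)
  | [] => [[]]
  | c :: cs =>
    if c = '\n' then [] :: pvSplitLines cs
    else
      match pvSplitLines cs with
      | [] => [[c]]
      | h :: t => (c :: h) :: t

-- … and the test whether a line's first non-whitespace character is '|'
def pvTableLine (cs : List Char) : Bool :=
  (cs.dropWhile PySem.Chars.isspace).headD ' ' == '|'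


-- prepend a prefix onto the first line of a split (helper for the splitOn invariant)
def pvConsHead (x : List Char) : List (List Char) → List (List Char)
  | [] => [x]
  | h :: t => (x ++ h) :: t

theorem pvSplitLines_ne_nil (cs : List Char) : pvSplitLines cs ≠ [] := by
  cases cs with
  | nil => simp [pvSplitLines]
  | cons c cs' =>
    simp only [pvSplitLines]
    split
    · simp
    · split <;> simp

theorem pvConsHead_nil (cs : List Char) : pvConsHead [] (pvSplitLines cs) = pvSplitLines cs := by
  cases h : pvSplitLines cs with
  | nil => exact absurd h (pvSplitLines_ne_nil cs)
  | cons a t => simp [pvConsHead]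

theorem pvGoSplit (fuel : Nat) : ∀ (l cur : List Char) (acc : List (List Char)),
    l.length ≤ fuel →
    PySem.Chars.splitOn.go ['\n'] fuel l cur acc
      = acc.reverse ++ pvConsHead cur.reverse (pvSplitLines l) := by
  induction fuel with
  | zero =>
    intro l cur acc h
    cases l with
    | nil => simp [PySem.Chars.splitOn.go, pvSplitLines, pvConsHead]
    | cons c cs => simp at h
  | succ f ih =>
    intro l cur acc h
    cases l with
    | nil => simp [PySem.Chars.splitOn.go, pvSplitLines, pvConsHead]
    | cons c cs =>
      by_cases hc : c = '\n'
      · subst hc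
        have hpre : List.isPrefixOf ['\n'] ('\n' :: cs) = true := by
          simp [List.isPrefixOf]
        simp only [PySem.Chars.splitOn.go, hpre, if_true, List.length_cons, List.drop_succ_cons,
          List.length_nil, List.drop_zero]
        rw [ih cs [] (cur.reverse :: acc) (by simpa using Nat.le_of_succ_le_succ h)]
        cases hp : pvSplitLines cs with
        | nil => exact absurd hp (pvSplitLines_ne_nil cs)
        | cons a t => simp [pvSplitLines, hp, pvConsHead]
      · have hpre : List.isPrefixOf ['\n'] (c :: cs) = false := by
          simp only [List.isPrefixOf, Bool.and_eq_false_iff]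
          left
          simpa using fun h' => hc h'.symm
        simp only [PySem.Chars.splitOn.go, hpre, Bool.false_eq_true, if_false]
        rw [ih cs (c :: cur) acc (by simpa using Nat.le_of_succ_le_succ h)]
        cases hp : pvSplitLines cs with
        | nil => exact absurd hp (pvSplitLines_ne_nil cs)
        | cons a t =>
          simp [pvSplitLines, hc, hp, pvConsHead]

theorem pvSplitLines_eq (cs : List Char) :
    PySem.Chars.splitOn cs ['\n'] = pvSplitLines cs := by
  simp only [PySem.Chars.splitOn]
  rw [pvGoSplit (cs.length + 1) cs [] [] (by omega)]
  simp [pvConsHead_nil]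

theorem pvLines (s : String) :
    (PySem.Str.split? s "\n").getD [] = (pvSplitLines s.toList).map String.ofList := by
  simp [PySem.Str.split?, PySem.Chars.split?, pvSplitLines_eq]

theorem pvStartsPipe (x : List Char) :
    PySem.Chars.startswith x ['|'] = (x.headD ' ' == '|') := by
  cases x <;> simp [PySem.Chars.startswith, List.isPrefixOf, eq_comm]

theorem pvStripHead (cs : List Char) :
    (PySem.Chars.strip cs).headD ' ' = (cs.dropWhile PySem.Chars.isspace).headD ' ' := by
  simp only [PySem.Chars.strip, PySem.Chars.lstrip, PySem.Chars.rstrip]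
  cases hd : cs.dropWhile PySem.Chars.isspace with
  | nil => simp
  | cons h t =>
    have hh : PySem.Chars.isspace h = false := by
      have := List.head?_dropWhile_not PySem.Chars.isspace cs
      rw [hd] at this
      simpa using this
    have hw : (h :: t).reverse.dropWhile PySem.Chars.isspace ≠ [] := by
      intro hnil
      have := List.dropWhile_eq_nil_iff.mp hnil h (by simp)
      rw [hh] at this
      exact absurd this (by simp)
    obtain ⟨u, hu⟩ := List.dropWhile_suffix (l := (h :: t).reverse) PySem.Chars.isspace
    have hlast : ((h :: t).reverse.dropWhile PySem.Chars.isspace).getLast? = some h := by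
      have h1 : (u ++ (h :: t).reverse.dropWhile PySem.Chars.isspace).getLast?
          = ((h :: t).reverse.dropWhile PySem.Chars.isspace).getLast? :=
        List.getLast?_append_of_ne_nil u hw
      rw [hu] at h1
      rw [← h1, List.reverse_cons, List.getLast?_concat]
    rw [show (((h :: t).reverse.dropWhile PySem.Chars.isspace).reverse).headD ' '
        = (((h :: t).reverse.dropWhile PySem.Chars.isspace).reverse).head?.getD ' ' from by
      simp [List.headD_eq_head?_getD]]
    rw [List.head?_reverse, hlast]
    simp

theorem pvTab_ofList (cs : List Char) :
    pvTab (String.ofList cs) = pvTableLine cs := by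
  simp only [pvTab, pvTableLine, PySem.Str.startswith_eq, PySem.Str.toList_strip,
    String.toList_ofList, show ("|" : String).toList = ['|'] from rfl]
  rw [pvStartsPipe, pvStripHead]

set_option maxHeartbeats 1000000 in
theorem pvD_sem (s : String) :
    (((PySem.Str.split? s "\n").getD []).reverse.takeWhile pvTab).length
      = ((pvSplitLines s.toList).reverse.takeWhile pvTableLine).length := by
  rw [pvLines, ← List.map_reverse, List.takeWhile_map, List.length_map,
    show (pvTab ∘ String.ofList) = pvTableLine from funext pvTab_ofList]

-- ---- the one-pass pvTrailRun computes the trailing-table-run length of the line split ----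

-- status of a single (newline-free) line, as pvLineStep's second component tracks it
def pvLineStatus (line : List Char) : Nat :=
  match (line.dropWhile PySem.Chars.isspace).head? with
  | none => 0
  | some c => if c = '|' then 1 else 2

def pvFinal (st : Nat × Nat) : Nat := if st.2 == 1 then st.1 + 1 else 0

theorem pvTableLine_eq_status (line : List Char) :
    pvTableLine line = (pvLineStatus line == 1) := by
  unfold pvTableLine pvLineStatus
  cases h : (line.dropWhile PySem.Chars.isspace).head? with
  | none => simp [List.headD_eq_head?_getD, h]
  | some c =>
    by_cases hc : c = '|' <;> simp [List.headD_eq_head?_getD, h, hc]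

theorem pvFoldS (line : List Char) (h : '\n' ∉ line) (r s : Nat) (hs : s ≠ 0) :
    line.foldl pvLineStep (r, s) = (r, s) := by
  induction line with
  | nil => rfl
  | cons c cs ih =>
    have hc : ¬ c = '\n' := fun hh => h (hh ▸ List.mem_cons_self ..)
    have hstep : pvLineStep (r, s) c = (r, s) := by
      simp [pvLineStep, hc, hs]
    rw [List.foldl_cons, hstep, ih (fun hm => h (List.mem_cons_of_mem _ hm))]

theorem pvFold0 (line : List Char) (h : '\n' ∉ line) (r : Nat) :
    line.foldl pvLineStep (r, 0) = (r, pvLineStatus line) := by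
  induction line with
  | nil => rfl
  | cons c cs ih =>
    have hc : ¬ c = '\n' := fun hh => h (hh ▸ List.mem_cons_self ..)
    have htl : '\n' ∉ cs := fun hm => h (List.mem_cons_of_mem _ hm)
    by_cases hws : PySem.Chars.isspace c = true
    · have hstep : pvLineStep (r, 0) c = (r, 0) := by simp [pvLineStep, hc, hws]
      rw [List.foldl_cons, hstep, ih htl]
      simp [pvLineStatus, List.dropWhile_cons_of_pos hws]
    · by_cases hp : c = '|'
      · have hstep : pvLineStep (r, 0) c = (r, 1) := by
          subst hp
          simp [pvLineStep, hc, show PySem.Chars.isspace '|' = false from by decide]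
        rw [List.foldl_cons, hstep, pvFoldS cs htl r 1 (by simp)]
        unfold pvLineStatus
        rw [List.dropWhile_cons_of_neg hws]
        simp [hp]
      · have hstep : pvLineStep (r, 0) c = (r, 2) := by simp [pvLineStep, hc, hws, hp]
        rw [List.foldl_cons, hstep, pvFoldS cs htl r 2 (by simp)]
        unfold pvLineStatus
        rw [List.dropWhile_cons_of_neg hws]
        simp [hp]

theorem pvSplitLines_single (cs : List Char) (h : '\n' ∉ cs) : pvSplitLines cs = [cs] := by
  induction cs with
  | nil => rfl
  | cons c cs' ih =>
    have hc : ¬ c = '\n' := fun hh => h (hh ▸ List.mem_cons_self ..)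
    simp only [pvSplitLines, hc, if_false, ih (fun hm => h (List.mem_cons_of_mem _ hm))]

theorem pvSplitLines_append (l1 rest : List Char) (h : '\n' ∉ l1) :
    pvSplitLines (l1 ++ '\n' :: rest) = l1 :: pvSplitLines rest := by
  induction l1 with
  | nil => simp [pvSplitLines]
  | cons c l1' ih =>
    have hc : ¬ c = '\n' := fun hh => h (hh ▸ List.mem_cons_self ..)
    simp only [List.cons_append, pvSplitLines, hc, if_false,
      ih (fun hm => h (List.mem_cons_of_mem _ hm))]

theorem pvLenTake {p : List Char → Bool} {l : List (List Char)} :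
    ((l.takeWhile p).length = l.length) ↔ l.all p := by
  constructor
  · intro h
    exact List.all_eq_true.mpr (List.takeWhile_eq_self_iff.mp ((List.takeWhile_prefix _).eq_of_length h))
  · intro h
    rw [List.takeWhile_eq_self_iff.mpr (List.all_eq_true.mp h)]

theorem pvG (cs : List Char) (r : Nat) :
    pvFinal (cs.foldl pvLineStep (r, 0))
      = ((pvSplitLines cs).reverse.takeWhile pvTableLine).length
        + (if (pvSplitLines cs).all pvTableLine then r else 0) := by
  induction hn : cs.length using Nat.strong_induction_on generalizing cs r with
  | _ n ih =>
  by_cases hmem : '\n' ∈ cs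
  · -- split off the first line at the first newline
    have hd : cs.dropWhile (fun c => c != '\n') ≠ [] := by
      intro hnil
      have := List.dropWhile_eq_nil_iff.mp hnil '\n' hmem
      simp at this
    cases hdw : cs.dropWhile (fun c => c != '\n') with
    | nil => exact absurd hdw hd
    | cons c0 d' =>
      have hc0 : c0 = '\n' := by
        have := pvDropWhile_head_false (fun c => c != '\n') cs c0 d' hdw
        simpa using this
      subst hc0
      have hsplit := List.takeWhile_append_dropWhile (p := fun c => c != '\n') (l := cs)
      rw [hdw] at hsplit
      have hl1 : '\n' ∉ cs.takeWhile (fun c => c != '\n') := by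
        intro hm
        have := List.mem_takeWhile_imp hm
        simp at this
      have hlen1 : d'.length < cs.length := by
        have := List.length_dropWhile_le (p := fun c => c != '\n') (l := cs)
        rw [hdw] at this
        simp only [List.length_cons] at this
        omega
      conv_lhs => rw [← hsplit]
      conv_rhs => rw [← hsplit]
      rw [List.foldl_append, pvFold0 _ hl1 r, List.foldl_cons]
      rw [show pvLineStep (r, pvLineStatus (cs.takeWhile (fun c => c != '\n'))) '\n'
          = ((if pvLineStatus (cs.takeWhile (fun c => c != '\n')) == 1 then r + 1 else 0), 0) from by
        simp [pvLineStep]]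
      rw [ih d'.length (by omega) d' _ rfl]
      rw [pvSplitLines_append _ _ hl1]
      rw [show (cs.takeWhile (fun c => c != '\n') :: pvSplitLines d').reverse
          = (pvSplitLines d').reverse ++ [cs.takeWhile (fun c => c != '\n')] from by simp]
      rw [List.takeWhile_append]
      by_cases hall : ((pvSplitLines d').all pvTableLine) = true
      · have hTd : ((pvSplitLines d').reverse.takeWhile pvTableLine).length = (pvSplitLines d').length := by
          have h2 := pvLenTake (p := pvTableLine) (l := (pvSplitLines d').reverse)
          rw [List.length_reverse] at h2
          exact h2.mpr (by simpa using hall)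
        have hcond : (List.takeWhile pvTableLine (pvSplitLines d').reverse).length
            = ((pvSplitLines d').reverse).length := by
          rw [List.length_reverse]; exact hTd
        rw [if_pos hcond]
        by_cases htab : pvTableLine (cs.takeWhile (fun c => c != '\n')) = true
        · have hst : (pvLineStatus (cs.takeWhile (fun c => c != '\n')) == 1) = true := by
            rw [pvTableLine_eq_status] at htab; exact htab
          rw [List.takeWhile_cons_of_pos htab]
          simp [hst, hall, htab, hTd]
          omega
        · have hst : (pvLineStatus (cs.takeWhile (fun c => c != '\n')) == 1) = false := by
            rw [pvTableLine_eq_status] at htab; simpa using htab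
          rw [List.takeWhile_cons_of_neg (by simpa using htab)]
          simp [hst, hall, hTd, show pvTableLine (cs.takeWhile (fun c => c != '\n')) = false from by
            simpa using htab]
      · have hcond : ¬ ((List.takeWhile pvTableLine (pvSplitLines d').reverse).length
            = ((pvSplitLines d').reverse).length) := by
          rw [List.length_reverse]
          intro hh
          have h2 : (pvSplitLines d').reverse.all pvTableLine :=
            pvLenTake.mp (by rw [List.length_reverse]; exact hh)
          rw [List.all_reverse] at h2
          exact hall h2
        rw [if_neg hcond]
        simp [show ((pvSplitLines d').all pvTableLine) = false from by simpa using hall]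
  · rw [pvFold0 cs hmem r, pvSplitLines_single cs hmem]
    by_cases htab : pvTableLine cs = true
    · have hst : pvLineStatus cs == 1 := by rw [pvTableLine_eq_status] at htab; exact htab
      simp [pvFinal, hst, htab, Nat.add_comm]
    · have hst : ¬ (pvLineStatus cs == 1) = true := by
        rw [pvTableLine_eq_status] at htab; exact htab
      simp [pvFinal, hst, Bool.eq_false_iff.mpr htab]

theorem pvTrail_eq (cs : List Char) :
    pvTrailRun cs = ((pvSplitLines cs).reverse.takeWhile pvTableLine).length := by
  show pvFinal (cs.foldl pvLineStep (0, 0)) = _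
  rw [pvG cs 0]
  simp

-- ---- tightness: inside D_, A's and B's outputs always differ (B's rendering is strictly longer) ----

-- weight of a line list under join "\n": each line costs its length plus one separator
def pvW (L : List String) : Nat := (L.map (fun s => s.toList.length + 1)).sum

theorem pvW_append (a b : List String) : pvW (a ++ b) = pvW a + pvW b := by
  simp [pvW]

theorem pvW_pos (L : List String) (h : L ≠ []) : 0 < pvW L := by
  cases L with
  | nil => exact absurd rfl h
  | cons x xs => simp only [pvW, List.map_cons, List.sum_cons]; omega

theorem pvW_flatMap {α : Type} (R : List α) (g : α → List String) :
    pvW (R.flatMap g) = (R.map (fun i => pvW (g i))).sum := by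
  induction R with
  | nil => simp [pvW]
  | cons a t ih => simp only [List.flatMap_cons, pvW_append, ih, List.map_cons, List.sum_cons]

theorem pvJoinLen (x : String) (xs : List String) :
    (PySem.Chars.join ['\n'] ((x :: xs).map String.toList)).length + 1 = pvW (x :: xs) := by
  induction xs generalizing x with
  | nil => simp [PySem.Chars.join_singleton, pvW]
  | cons y ys ih =>
    have h1 := ih y
    simp only [List.map_cons] at h1 ⊢
    rw [PySem.Chars.join_cons_cons]
    simp only [List.length_append, List.length_cons, List.length_nil]
    simp only [List.map_cons, pvW, List.sum_cons] at h1 ⊢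
    omega

theorem pvJoinLen' (L : List String) (h : L ≠ []) :
    (PySem.Chars.join ['\n'] (L.map String.toList)).length + 1 = pvW L := by
  cases L with
  | nil => exact absurd rfl h
  | cons x xs => exact pvJoinLen x xs

theorem pvSumShift {α : Type} (R : List α) (A : Nat) (f : α → Nat) :
    (R.map (fun k => A + f k)).sum = R.length * A + (R.map f).sum := by
  induction R with
  | nil => simp
  | cons a t ih =>
    simp only [List.map_cons, List.sum_cons, List.length_cons, ih]
    ring

theorem pvPartition {α : Type} (M : Nat) : ∀ (c : Nat) (data : List α), data.length ≤ c * M →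
    (List.range c).flatMap (fun k => List.take M (List.drop (M * k) data)) = data := by
  intro c
  induction c with
  | zero =>
    intro data h
    simp only [Nat.zero_mul, Nat.le_zero] at h
    rw [List.length_eq_zero_iff.mp h]
    simp
  | succ c ih =>
    intro data h
    rw [List.range_succ_eq_map, List.flatMap_cons, List.flatMap_map]
    have hfun : (fun (k : Nat) => List.take M (List.drop (M * (k + 1)) data))
        = (fun k => List.take M (List.drop (M * k) (data.drop M))) := by
      funext k
      rw [List.drop_drop]
      congr 2
      ring
    simp only [Nat.mul_zero, List.drop_zero]
    rw [show (fun (a : Nat) => List.take M (List.drop (M * (a + 1)) data))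
        = (fun k => List.take M (List.drop (M * k) (data.drop M))) from hfun]
    rw [Nat.succ_mul] at h
    rw [ih (data.drop M) (by simp only [List.length_drop]; omega)]
    exact List.take_append_drop M data

theorem pvRangeEq (N m : Int) (hm : 1 ≤ m) (hN : 0 < N) :
    PySem.List.pyRange 0 N m = (List.range ((N + m - 1) / m).toNat).map (fun (k : Nat) => m * (k : Int)) := by
  unfold PySem.List.pyRange
  rw [if_neg (by omega), if_pos (by omega), if_pos (by omega)]
  simp only [Int.sub_zero]
  exact List.map_congr_left (fun a _ => by ring)

theorem pvCountGe (N m : Int) (hm : 1 ≤ m) (hN : 0 ≤ N) : N ≤ ((N + m - 1) / m) * m := by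
  have hmod := Int.ediv_add_emod (N + m - 1) m
  have hr0 := Int.emod_nonneg (N + m - 1) (by omega : m ≠ 0)
  have hrlt := Int.emod_lt_of_pos (N + m - 1) (by omega : 0 < m)
  rw [Int.mul_comm]
  omega

theorem pvCountGe2 (N m : Int) (hm : 1 ≤ m) (hN : m < N) : 2 ≤ (N + m - 1) / m := by
  rw [Int.le_ediv_iff_mul_le (by omega : (0:Int) < m)]
  omega

theorem pvChunkW (m : Int) (hm : 1 ≤ m) (blk : List String) (hlen : m + 2 < (blk.length : Int)) :
    pvW blk < pvW (pvChunk m blk) := by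
  obtain ⟨h0, h1, data, rfl⟩ : ∃ a b t, blk = a :: b :: t := by
    cases blk with
    | nil => simp at hlen; omega
    | cons a t =>
      cases t with
      | nil => simp at hlen; omega
      | cons b t' => exact ⟨a, b, t', rfl⟩
  have hN : m < (data.length : Int) := by
    simp only [List.length_cons] at hlen
    push_cast at hlen ⊢
    omega
  unfold pvChunk
  rw [show PySem.List.slice (h0 :: h1 :: data) (some 2) none = data from by
    rw [PySem.List.slice_from _ (by omega : (0:Int) ≤ 2)]; rfl]
  rw [show (h0 :: h1 :: data).getD 0 "" = h0 from rfl,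
    show (h0 :: h1 :: data).getD 1 "" = h1 from rfl]
  rw [pvRangeEq (data.length : Int) m hm (by omega), List.flatMap_map]
  have hM1 : 1 ≤ m.toNat := by omega
  have hmM : m = (m.toNat : Int) := by omega
  have hcge : data.length ≤ (((data.length : Int) + m - 1) / m).toNat * m.toNat := by
    have h1' := pvCountGe (data.length : Int) m hm (by omega)
    have hq0 : 0 ≤ ((data.length : Int) + m - 1) / m :=
      Int.ediv_nonneg (by omega) (by omega)
    have hcast : (((((data.length : Int) + m - 1) / m).toNat * m.toNat : Nat) : Int)
        = (((data.length : Int) + m - 1) / m) * m := by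
      push_cast
      rw [Int.toNat_of_nonneg hq0, Int.toNat_of_nonneg (by omega : (0:Int) ≤ m)]
    omega
  have hc2 : 2 ≤ (((data.length : Int) + m - 1) / m).toNat := by
    have := pvCountGe2 (data.length : Int) m hm hN
    omega
  have hsl : (fun (k : Nat) => [h0, h1]
        ++ PySem.List.slice data (some (m * (k : Int))) (some (m * (k : Int) + m)) ++ ["\n"])
      = (fun (k : Nat) => [h0, h1] ++ List.take m.toNat (List.drop (m.toNat * k) data) ++ ["\n"]) := by
    funext k
    have hcast1 : m * (k : Int) = ((m.toNat * k : Nat) : Int) := by push_cast [← hmM]; ring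
    have hcast2 : m * (k : Int) + m = ((m.toNat * k + m.toNat : Nat) : Int) := by
      push_cast [← hmM]; ring
    rw [hcast2, hcast1, PySem.List.slice_natCast, Nat.add_sub_cancel_left]
  simp only [hsl]
  rw [pvW_flatMap]
  have hWg : (fun (k : Nat) => pvW ([h0, h1] ++ List.take m.toNat (List.drop (m.toNat * k) data) ++ ["\n"]))
      = (fun (k : Nat) => (h0.toList.length + h1.toList.length + 4)
          + pvW (List.take m.toNat (List.drop (m.toNat * k) data))) := by
    funext k
    rw [pvW_append, pvW_append]
    have hw2 : pvW ["\n"] = 2 := by decide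
    simp only [pvW, List.map_cons, List.map_nil, List.sum_cons, List.sum_nil] at hw2 ⊢
    omega
  rw [hWg, pvSumShift]
  rw [show ((List.range (((data.length : Int) + m - 1) / m).toNat).map
        (fun k => pvW (List.take m.toNat (List.drop (m.toNat * k) data)))).sum
      = pvW data from by
    rw [← pvW_flatMap, pvPartition m.toNat _ data hcge]]
  simp only [List.length_range]
  have hmul := Nat.mul_le_mul_right (h0.toList.length + h1.toList.length + 4) hc2
  simp only [pvW, List.map_cons, List.sum_cons]
  omega

-- the last block of the partition is exactly the (nonempty) trailing table run
theorem pvLastTable (ls : List String) (h : ls.reverse.takeWhile pvTab ≠ []) :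
    ∃ P, pvBlocksOf ls = P ++ [(true, (ls.reverse.takeWhile pvTab).reverse)] := by
  induction hn : ls.length using Nat.strong_induction_on generalizing ls with
  | _ n ih =>
  cases ls with
  | nil => simp at h
  | cons l ls' =>
    have htab : pvTab l = PySem.Str.startswith (PySem.Str.strip l) "|" := rfl
    have hsplit := List.takeWhile_append_dropWhile
      (p := fun x => PySem.Str.startswith (PySem.Str.strip x) "|" == PySem.Str.startswith (PySem.Str.strip l) "|") (l := ls')
    have hrun : ∀ x ∈ ls'.takeWhile (fun x => PySem.Str.startswith (PySem.Str.strip x) "|" == PySem.Str.startswith (PySem.Str.strip l) "|"),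
        pvTab x = PySem.Str.startswith (PySem.Str.strip l) "|" := by
      intro x hx
      have := List.mem_takeWhile_imp hx
      simpa [pvTab] using this
    have hlen := List.length_dropWhile_le
      (p := fun x => PySem.Str.startswith (PySem.Str.strip x) "|" == PySem.Str.startswith (PySem.Str.strip l) "|") (l := ls')
    cases hrest : ls'.dropWhile (fun x => PySem.Str.startswith (PySem.Str.strip x) "|" == PySem.Str.startswith (PySem.Str.strip l) "|") with
    | nil =>
      have hls' : ls'.takeWhile (fun x => PySem.Str.startswith (PySem.Str.strip x) "|" == PySem.Str.startswith (PySem.Str.strip l) "|") = ls' := by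
        conv_rhs => rw [← hsplit]
        rw [hrest, List.append_nil]
      cases ht : pvTab l with
      | false =>
        exfalso
        apply h
        apply List.takeWhile_eq_nil_iff.mpr
        intro hlt hp
        have hmem : ((l :: ls').reverse.get ⟨0, hlt⟩) ∈ l :: ls' :=
          List.mem_reverse.mp (List.get_mem _ _)
        rcases List.mem_cons.mp hmem with hx | hx
        · rw [hx, ht] at hp; exact absurd hp (by simp)
        · have := hrun _ (by rw [hls']; exact hx)
          rw [htab] at ht
          rw [this, ht] at hp
          exact absurd hp (by simp)
      | true =>
        have hall : ∀ x ∈ (l :: ls').reverse, pvTab x = true := by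
          intro x hx
          rcases List.mem_cons.mp (List.mem_reverse.mp hx) with hx | hx
          · rw [hx]; exact ht
          · rw [hrun x (by rw [hls']; exact hx), ← htab]; exact ht
        have hself : (l :: ls').reverse.takeWhile pvTab = (l :: ls').reverse :=
          List.takeWhile_eq_self_iff.mpr hall
        refine ⟨[], ?_⟩
        rw [pvBlocksOf_cons, hls', hrest, show pvBlocksOf ([] : List String) = [] from rfl]
        rw [hself, List.reverse_reverse, ← htab, ht]
        rfl
    | cons r rs =>
      have h1 := pvDropWhile_head_false
        (fun x => PySem.Str.startswith (PySem.Str.strip x) "|" == PySem.Str.startswith (PySem.Str.strip l) "|") ls' r rs hrest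
      have hrt : pvTab r = !(PySem.Str.startswith (PySem.Str.strip l) "|") := by
        simp only [pvTab]
        simp only [beq_eq_false_iff_ne, ne_eq] at h1
        cases hx : PySem.Str.startswith (PySem.Str.strip r) "|" <;>
          cases hy : PySem.Str.startswith (PySem.Str.strip l) "|" <;> simp_all
      have hshift : (l :: ls').reverse.takeWhile pvTab = (r :: rs).reverse.takeWhile pvTab := by
        have := pvTrailing_shift (PySem.Str.startswith (PySem.Str.strip l) "|") l
          (ls'.takeWhile (fun x => PySem.Str.startswith (PySem.Str.strip x) "|" == PySem.Str.startswith (PySem.Str.strip l) "|"))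
          (r :: rs) htab hrun (by intro x xs hx; cases hx; exact hrt) (by simp)
        rw [show (l :: ls') = (l :: ls'.takeWhile (fun x => PySem.Str.startswith (PySem.Str.strip x) "|" == PySem.Str.startswith (PySem.Str.strip l) "|")) ++ (r :: rs) from by
          rw [← hrest, List.cons_append, hsplit]]
        exact this
      have hlen1 : (r :: rs).length < (l :: ls').length := by
        rw [hrest] at hlen
        simp only [List.length_cons] at hlen ⊢
        omega
      obtain ⟨P', hP'⟩ := ih (r :: rs).length (by omega) (r :: rs)
        (by rw [← hshift]; exact h) rfl
      refine ⟨(PySem.Str.startswith (PySem.Str.strip l) "|",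
        l :: ls'.takeWhile (fun x => PySem.Str.startswith (PySem.Str.strip x) "|" == PySem.Str.startswith (PySem.Str.strip l) "|")) :: P', ?_⟩
      rw [pvBlocksOf_cons, hrest, hP', hshift]
      rfl

-- ===== VERDICT (by name: the statements are the Claim_ definitions above) =====
theorem split_large_markdown_tables_spec : Claim_unchanged_split_large_markdown_tables := by
  intro content max_rows _ hPre
  unfold Spec_split_large_markdown_tables
  intro hD
  have hkey : ((((PySem.Str.split? content "\n").getD []).reverse.takeWhile pvTab).length : Int) ≤ max_rows + 2
      ∨ (((PySem.Str.split? content "\n").getD []).reverse.takeWhile pvTab).length = 0 := by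
    by_cases hm : 1 ≤ max_rows
    · left
      unfold D_split_large_markdown_tables pvTrailOf at hD
      rw [pvD_sem content, ← pvTrail_eq] at *
      omega
    · right
      rcases hPre with hm' | hall
      · exact absurd hm' hm
      · rw [List.length_eq_zero_iff, List.takeWhile_eq_nil_iff]
        intro hlt hp
        have hmem : (((PySem.Str.split? content "\n").getD []).reverse.get ⟨0, hlt⟩)
            ∈ ((PySem.Str.split? content "\n").getD []) :=
          List.mem_reverse.mp (List.get_mem _ _)
        have := List.all_eq_true.mp hall _ hmem
        simp only [pvTab] at hp
        rw [hp] at this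
        exact absurd this (by simp)
  show split_large_markdown_tables content max_rows = _
  unfold split_large_markdown_tables split_large_markdown_tables_alt
  simp only []
  rw [pvA_go max_rows ((PySem.Str.split? content "\n").getD []) [] [] false (by simp),
    List.nil_append, pvGo_render max_rows, pvB_flatMap max_rows,
    pvNoTrailBig max_rows ((PySem.Str.split? content "\n").getD []) hkey]

theorem split_large_markdown_tables_changed : Claim_changed_split_large_markdown_tables := by
  unfold Claim_changed_split_large_markdown_tables
  refine ⟨by decide, by decide, by decide, ?_, ?_, by decide⟩
  · exact String.toList_inj.mp (by decide)
  · exact String.toList_inj.mp (by decide)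

theorem split_large_markdown_tables_tight : Claim_exact_split_large_markdown_tables := by
  intro content max_rows _ _ hD
  have hD' := hD
  unfold D_split_large_markdown_tables pvTrailOf at hD'
  obtain ⟨hgt, hm⟩ := hD'
  have htr : max_rows + 2 < ((((PySem.Str.split? content "\n").getD []).reverse.takeWhile pvTab).length : Int) := by
    rw [pvD_sem content, ← pvTrail_eq]
    exact_mod_cast hgt
  have hne : ((PySem.Str.split? content "\n").getD []).reverse.takeWhile pvTab ≠ [] := by
    intro hnil
    rw [hnil] at htr
    simp at htr
    omega
  obtain ⟨P, hP⟩ := pvLastTable _ hne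
  intro heq
  unfold split_large_markdown_tables split_large_markdown_tables_alt at heq
  simp only [] at heq
  rw [pvA_go max_rows ((PySem.Str.split? content "\n").getD []) [] [] false (by simp),
    List.nil_append, pvGo_render max_rows, pvB_flatMap max_rows, hP] at heq
  have hR : pvRender max_rows (P ++ [(true, (((PySem.Str.split? content "\n").getD []).reverse.takeWhile pvTab).reverse)])
      = P.flatMap (pvBody max_rows) ++ (((PySem.Str.split? content "\n").getD []).reverse.takeWhile pvTab).reverse := by
    unfold pvRender
    rw [List.dropLast_concat]
    rw [show (P ++ [(true, (((PySem.Str.split? content "\n").getD []).reverse.takeWhile pvTab).reverse)]).length - 1 = P.length by simp]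
    rw [List.drop_left]
    simp
  have hBB : (P ++ [(true, (((PySem.Str.split? content "\n").getD []).reverse.takeWhile pvTab).reverse)]).flatMap (pvBody max_rows)
      = P.flatMap (pvBody max_rows) ++ pvChunk max_rows (((PySem.Str.split? content "\n").getD []).reverse.takeWhile pvTab).reverse := by
    rw [List.flatMap_append]
    congr 1
    simp only [List.flatMap_cons, List.flatMap_nil, List.append_nil]
    unfold pvBody
    rw [if_pos (by simp only [List.length_reverse, Bool.true_and]; simpa using htr)]
  rw [hR, hBB] at heq
  have hWlt := pvChunkW max_rows hm (((PySem.Str.split? content "\n").getD []).reverse.takeWhile pvTab).reverse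
    (by rw [List.length_reverse]; exact htr)
  have hne1 : P.flatMap (pvBody max_rows) ++ (((PySem.Str.split? content "\n").getD []).reverse.takeWhile pvTab).reverse ≠ [] := by
    simp only [ne_eq, List.append_eq_nil_iff, List.reverse_eq_nil_iff]
    intro hc
    exact hne hc.2
  have hne2 : P.flatMap (pvBody max_rows) ++ pvChunk max_rows (((PySem.Str.split? content "\n").getD []).reverse.takeWhile pvTab).reverse ≠ [] := by
    simp only [ne_eq, List.append_eq_nil_iff]
    intro hc
    have h0 := pvW_pos _ (by simp only [ne_eq, List.reverse_eq_nil_iff]; exact hne :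
      (((PySem.Str.split? content "\n").getD []).reverse.takeWhile pvTab).reverse ≠ [])
    rw [hc.2] at hWlt
    simp [pvW] at hWlt
  have hlen := congrArg (fun s => s.toList.length) heq
  simp only [PySem.Str.toList_join, show ("\n" : String).toList = ['\n'] from rfl] at hlen
  have e1 := pvJoinLen' _ hne1
  have e2 := pvJoinLen' _ hne2
  rw [pvW_append] at e1 e2
  omega
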